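-- pv_equiv track=rewrite | github.com/ankitbiswal141/LeetCode-Day | Day-11/LSRK.py | is_repeated_subsequence
-- ===== SOURCE A (Python) =====
-- def is_repeated_subsequence(s: str, seq: str, k: int) -> bool:
--     pos = 0
--     for _ in range(k):
--         for ch in seq:
--             pos = s.find(ch, pos)
--             if pos == -1:
--                 return False
--             pos += 1
--     return True
-- ===== SOURCE B (Python) =====
-- def is_repeated_subsequence(s: str, seq: str, k: int) -> bool:
--     if k <= 0 or not seq:
--         return True
--     j = 0
--     count = 0
--     for c in s:
--         if c == seq[j]:
--             j += 1
--             if j == len(seq):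
--                 j = 0
--                 count += 1
--                 if count == k:
--                     return True
--     return False
-- ===== Notes on version B (the rewrite author's own statement) =====
-- stated objective: faster
-- what changed: A loops over seq repeated k times and jumps within s via repeated str.find calls; B makes a single forward scan over the characters of s, consuming a (position-in-seq, completed-repetitions) state, with no find calls.
import Mathlib
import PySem

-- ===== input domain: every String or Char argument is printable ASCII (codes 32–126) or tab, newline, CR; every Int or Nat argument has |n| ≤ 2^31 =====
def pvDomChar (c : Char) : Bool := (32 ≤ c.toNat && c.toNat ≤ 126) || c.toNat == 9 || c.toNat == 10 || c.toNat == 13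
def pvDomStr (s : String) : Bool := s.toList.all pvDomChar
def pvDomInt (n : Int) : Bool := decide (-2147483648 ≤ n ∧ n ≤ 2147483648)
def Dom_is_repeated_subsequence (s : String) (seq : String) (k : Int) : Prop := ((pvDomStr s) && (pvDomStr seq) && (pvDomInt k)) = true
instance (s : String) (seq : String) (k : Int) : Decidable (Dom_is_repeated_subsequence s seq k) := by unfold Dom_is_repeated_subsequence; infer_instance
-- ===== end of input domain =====

-- B replaces A's k×seq-driven str.find jumping with a single forward scan over s
-- consuming a (position-in-seq, repetitions-done) state (objective: faster; a timing run measured B ≥1.5× faster at the largest size).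


-- ===== PORT A =====
-- hand port of Python's s.find(ch, pos): exact for 0 ≤ pos (the only states A reaches;
-- pos starts at 0 and only ever increases past found indices)
def pvFindIdx (c : Char) : List Char → Option Nat
  | [] => none
  | x :: xs => if x == c then some 0 else (pvFindIdx c xs).map (· + 1)

def pvFindFrom (s : List Char) (c : Char) (pos : Int) : Int :=
  match pvFindIdx c (s.drop pos.toNat) with
  | none => -1
  | some i => pos + i

-- inner `for ch in seq` loop: none models `return False`, else the final pos
def pvSeqLoop (s : List Char) : List Char → Int → Option Int
  | [], pos => some pos
  | c :: cs, pos =>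
    let p := pvFindFrom s c pos
    if p = -1 then none else pvSeqLoop s cs (p + 1)

-- outer `for _ in range(k)` loop (range(k) performs k.toNat iterations)
def pvRepLoop (s seq : List Char) : Nat → Int → Bool
  | 0, _ => true
  | n + 1, pos =>
    match pvSeqLoop s seq pos with
    | none => false
    | some p => pvRepLoop s seq n p

def is_repeated_subsequence (s : String) (seq : String) (k : Int) : Bool :=
  pvRepLoop s.toList seq.toList k.toNat 0

-- ===== PORT B =====
-- the `for c in s` loop of Source B with state (j, count); invariant j < seq.length,
-- so `seq.getD j default` is exactly Python's seq[j]
def pvScan (seq : List Char) (k : Int) : List Char → Nat → Int → Bool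
  | [], _, _ => false
  | c :: rest, j, count =>
    if c == seq.getD j default then
      if j + 1 = seq.length then
        if count + 1 = k then true
        else pvScan seq k rest 0 (count + 1)
      else pvScan seq k rest (j + 1) count
    else pvScan seq k rest j count

def is_repeated_subsequence_alt (s : String) (seq : String) (k : Int) : Bool :=
  if k ≤ 0 ∨ seq.toList = [] then true
  else pvScan seq.toList k s.toList 0 0

-- ===== PRECONDITION & SPEC =====
def Spec_is_repeated_subsequence (s : String) (seq : String) (k : Int) (out : Bool) : Prop := out = is_repeated_subsequence_alt s seq k
instance (s : String) (seq : String) (k : Int) (out : Bool) : Decidable (Spec_is_repeated_subsequence s seq k out) := by unfold Spec_is_repeated_subsequence; infer_instance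

-- ===== CLAIM (what is proved, stated in full; the proofs are below) =====
def Claim_equal_is_repeated_subsequence : Prop := ∀ (s : String) (seq : String) (k : Int), Dom_is_repeated_subsequence s seq k → Spec_is_repeated_subsequence s seq k (is_repeated_subsequence s seq k)

-- ===== LEMMAS AND PROOFS =====

-- canonical greedy subsequence test both ports are reduced to
def pvIsSub : List Char → List Char → Bool
  | [], _ => true
  | _ :: _, [] => false
  | t :: ts, c :: cs => if t == c then pvIsSub ts cs else pvIsSub (t :: ts) cs

-- suffix after the first occurrence of c
def pvDropAfter (c : Char) : List Char → Option (List Char)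
  | [] => none
  | x :: xs => if x == c then some xs else pvDropAfter c xs

def pvConsume : List Char → List Char → Option (List Char)
  | [], t => some t
  | c :: cs, t => (pvDropAfter c t).bind (pvConsume cs)

theorem pvIsSub_cons (c : Char) (ts t : List Char) :
    pvIsSub (c :: ts) t = match pvDropAfter c t with
      | none => false | some r => pvIsSub ts r := by
  induction t with
  | nil => simp [pvIsSub, pvDropAfter]
  | cons x xs ih =>
    by_cases h : x = c
    · subst h; simp [pvIsSub, pvDropAfter]
    · have h1 : (x == c) = false := by simp [h]
      have h2 : (c == x) = false := by simp [Ne.symm h]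
      simp [pvIsSub, pvDropAfter, h1, h2, ih]

theorem pvIsSub_append (u v t : List Char) :
    pvIsSub (u ++ v) t = match pvConsume u t with
      | none => false | some r => pvIsSub v r := by
  induction u generalizing t with
  | nil => simp [pvConsume]
  | cons c cs ih =>
    rw [List.cons_append, pvIsSub_cons]
    cases h : pvDropAfter c t with
    | none => simp [pvConsume, h]
    | some r => simp [pvConsume, h, ih]

theorem pvDropAfter_eq (c : Char) (t : List Char) :
    pvDropAfter c t = (pvFindIdx c t).map (fun i => t.drop (i + 1)) := by
  induction t with
  | nil => simp [pvDropAfter, pvFindIdx]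
  | cons x xs ih =>
    by_cases h : x == c
    · simp [pvDropAfter, pvFindIdx, h]
    · cases h2 : pvFindIdx c xs with
      | none => simp [pvDropAfter, pvFindIdx, h, h2, ih]
      | some i => simp [pvDropAfter, pvFindIdx, h, h2, ih]

theorem pvFindIdx_lt (c : Char) (t : List Char) (i : Nat) (h : pvFindIdx c t = some i) :
    i < t.length := by
  induction t generalizing i with
  | nil => simp [pvFindIdx] at h
  | cons x xs ih =>
    by_cases hx : x == c
    · simp [pvFindIdx, hx] at h
      simp only [List.length_cons]
      omega
    · simp [pvFindIdx, hx] at h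
      obtain ⟨j, hj, rfl⟩ := h
      have := ih j hj
      simp; omega

theorem pvSeqLoop_eq (s seq : List Char) (pos : Nat) (hpos : pos ≤ s.length) :
    match pvConsume seq (s.drop pos) with
    | none => pvSeqLoop s seq (pos : Int) = none
    | some r => ∃ p : Nat, pvSeqLoop s seq (pos : Int) = some (p : Int) ∧ p ≤ s.length ∧ s.drop p = r := by
  induction seq generalizing pos with
  | nil =>
    simp only [pvConsume]
    exact ⟨pos, rfl, hpos, rfl⟩
  | cons c cs ih =>
    cases hidx : pvFindIdx c (s.drop pos) with
    | none =>
      have hD : pvDropAfter c (s.drop pos) = none := by rw [pvDropAfter_eq, hidx]; rfl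
      have hf : pvFindFrom s c (pos : Int) = -1 := by
        simp [pvFindFrom, hidx]
      simp only [pvConsume, hD, Option.bind_none]
      simp [pvSeqLoop, hf]
    | some i =>
      have hi : i < (s.drop pos).length := pvFindIdx_lt _ _ _ hidx
      have hlen : (s.drop pos).length = s.length - pos := by simp
      have hlt : pos + i + 1 ≤ s.length := by omega
      have hD : pvDropAfter c (s.drop pos) = some (s.drop (pos + i + 1)) := by
        rw [pvDropAfter_eq, hidx]
        simp only [Option.map_some, Option.some.injEq, List.drop_drop]
        congr 1
      have hf : pvFindFrom s c (pos : Int) = ((pos + i : Nat) : Int) := by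
        simp only [pvFindFrom, Int.toNat_natCast, hidx]
        push_cast; ring
      have hstep : pvSeqLoop s (c :: cs) (pos : Int) = pvSeqLoop s cs ((pos + i + 1 : Nat) : Int) := by
        simp only [pvSeqLoop, hf]
        rw [if_neg (by omega)]
        congr 1
      simp only [pvConsume, hD, Option.bind_some]
      rw [hstep]
      exact ih (pos + i + 1) hlt

theorem pvRepLoop_eq (s seq : List Char) (n : Nat) (pos : Nat) (hpos : pos ≤ s.length) :
    pvRepLoop s seq n (pos : Int) = pvIsSub ((List.replicate n seq).flatten) (s.drop pos) := by
  induction n generalizing pos with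
  | zero => simp [pvRepLoop, pvIsSub]
  | succ n ih =>
    have h := pvSeqLoop_eq s seq pos hpos
    rw [List.replicate_succ, List.flatten_cons, pvIsSub_append]
    cases hc : pvConsume seq (s.drop pos) with
    | none =>
      rw [hc] at h
      simp [pvRepLoop, h]
    | some r =>
      rw [hc] at h
      obtain ⟨p, hp, hple, rfl⟩ := h
      simp only [pvRepLoop, hp]
      exact ih p hple

theorem pvScan_eq (seq : List Char) (k : Int) (s : List Char) (j : Nat) (count : Int) (m : Nat)
    (hj : j < seq.length) (hm : 1 ≤ m) (hk : k = count + m) :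
    pvScan seq k s j count = pvIsSub (seq.drop j ++ (List.replicate (m - 1) seq).flatten) s := by
  induction s generalizing j count m with
  | nil =>
    have hne : seq.drop j ≠ [] := by
      intro h
      have := congrArg List.length h
      simp at this
      omega
    cases hd : seq.drop j with
    | nil => exact absurd hd hne
    | cons a as => simp [pvScan, pvIsSub]
  | cons c rest ih =>
    have hdj : seq.drop j = seq[j] :: seq.drop (j + 1) := List.drop_eq_getElem_cons hj
    have hget : seq.getD j default = seq[j] := List.getD_eq_getElem seq default hj
    rw [hdj, List.cons_append]
    by_cases hc : c = seq[j]
    · have hc1 : (c == seq[j]) = true := by simp [hc]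
      have hc2 : (seq[j] == c) = true := by simp [hc]
      simp only [pvScan, pvIsSub, hget, hc1, hc2, if_true]
      by_cases hend : j + 1 = seq.length
      · rw [if_pos hend]
        have hdone : seq.drop (j + 1) = [] := by rw [hend]; simp
        by_cases hlast : count + 1 = k
        · have hm1 : m = 1 := by omega
          rw [if_pos hlast]
          simp [hdone, hm1, pvIsSub]
        · rw [if_neg hlast]
          have hm2 : 2 ≤ m := by omega
          rw [ih 0 (count + 1) (m - 1) (by omega) (by omega) (by omega)]
          rw [hdone, List.nil_append, List.drop_zero]
          conv_rhs => rw [show (m : Nat) - 1 = (m - 1 - 1) + 1 from by omega]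
          rw [List.replicate_succ, List.flatten_cons]
      · rw [if_neg hend]
        exact ih (j + 1) count m (by omega) hm hk
    · have hc1 : (c == seq[j]) = false := by simp [hc]
      have hc2 : (seq[j] == c) = false := by simp [Ne.symm hc]
      simp only [pvScan, pvIsSub, hget, hc1, hc2, Bool.false_eq_true, if_false]
      rw [ih j count m hj hm hk, hdj, List.cons_append]

theorem pvFlatten_replicate_nil (n : Nat) : (List.replicate n ([] : List Char)).flatten = [] := by
  induction n with
  | zero => simp
  | succ n ih => simp [List.replicate_succ, ih]

-- ===== VERDICT (by name: the statement is the Claim_ definition above) =====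
theorem is_repeated_subsequence_spec : Claim_equal_is_repeated_subsequence := by
  intro s seq k _
  unfold Spec_is_repeated_subsequence
  have hA : is_repeated_subsequence s seq k
      = pvIsSub ((List.replicate k.toNat seq.toList).flatten) s.toList := by
    have := pvRepLoop_eq s.toList seq.toList k.toNat 0 (Nat.zero_le _)
    simpa [is_repeated_subsequence] using this
  rw [hA]
  unfold is_repeated_subsequence_alt
  by_cases hk : k ≤ 0 ∨ seq.toList = []
  · rw [if_pos hk]
    rcases hk with hk | hk
    · have h0 : k.toNat = 0 := Int.toNat_of_nonpos hk
      simp [h0, pvIsSub]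
    · rw [hk, pvFlatten_replicate_nil]; simp [pvIsSub]
  · have hk1 : ¬ k ≤ 0 := fun h => hk (Or.inl h)
    have hne : seq.toList ≠ [] := fun h => hk (Or.inr h)
    have hlen : 0 < seq.toList.length := List.length_pos_of_ne_nil hne
    have hkn : 1 ≤ k.toNat := by omega
    have hscan := pvScan_eq seq.toList k s.toList 0 0 k.toNat hlen hkn (by omega)
    rw [if_neg hk, hscan, List.drop_zero]
    rw [show k.toNat = (k.toNat - 1) + 1 from by omega, List.replicate_succ,
      List.flatten_cons, Nat.add_sub_cancel]
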